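-- pv_equiv track=rewrite | github.com/Weilty/MVGNN | test.py | cannot_reach_destination
-- ===== SOURCE A (Python) =====
-- def cannot_reach_destination(n, m, obstacles):
--     max_blocked_column = 0
--     seconds = 0
--
--     for i in range(len(obstacles)):
--         x, y = obstacles[i]
--         max_blocked_column = max(max_blocked_column, y)
--
--         if max_blocked_column >= m:
--             break
--
--         seconds += 1
--
--     return seconds
-- ===== SOURCE B (Python) =====
-- def cannot_reach_destination(n, m, obstacles):
--     # Stage 1: prefix maxima of blocked columns (seeded with 0, like A's accumulator start).
--     prefix = []
--     cur = 0
--     for _, y in obstacles: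
--         if y > cur:
--             cur = y
--         prefix.append(cur)
--     # Stage 2: prefix is nondecreasing, so binary-search the first index with prefix[i] >= m.
--     lo, hi = 0, len(prefix)
--     while lo < hi:
--         mid = (lo + hi) // 2
--         if prefix[mid] >= m:
--             hi = mid
--         else:
--             lo = mid + 1
--     return lo
-- ===== Notes on version B (the rewrite author's own statement) =====
-- stated objective: alternative
-- what changed: B replaces A's single scan-with-break by two stages: it first materialises the prefix-maximum array of blocked columns, then exploits its monotonicity to binary-search for the first prefix maximum >= m, returning that index (= A's seconds counter).
import Mathlib
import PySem

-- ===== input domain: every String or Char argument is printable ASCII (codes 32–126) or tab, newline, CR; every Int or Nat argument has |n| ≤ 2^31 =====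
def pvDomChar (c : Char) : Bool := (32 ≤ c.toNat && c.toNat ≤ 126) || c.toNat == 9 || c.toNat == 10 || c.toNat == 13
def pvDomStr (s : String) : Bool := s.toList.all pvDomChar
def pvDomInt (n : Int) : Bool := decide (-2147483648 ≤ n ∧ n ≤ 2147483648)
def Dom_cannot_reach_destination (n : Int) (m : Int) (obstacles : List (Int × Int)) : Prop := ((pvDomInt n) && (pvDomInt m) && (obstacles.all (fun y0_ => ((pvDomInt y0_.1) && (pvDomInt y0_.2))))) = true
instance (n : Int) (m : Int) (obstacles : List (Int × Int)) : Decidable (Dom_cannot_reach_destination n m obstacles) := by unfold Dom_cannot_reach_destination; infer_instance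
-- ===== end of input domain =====

-- B replaces A's scan-with-break by a prefix-maximum array plus a binary search for its first entry >= m (alternative decomposition; same answer since the prefix maximum is nondecreasing).



-- ===== PORT A =====
-- A's loop: running max + seconds counter; break becomes returning the accumulator.
def pvLoopA (m : Int) : List (Int × Int) → Int → Int → Int
  | [], _, seconds => seconds
  | (_, y) :: rest, maxb, seconds =>
    let maxb' := max maxb y
    if maxb' ≥ m then seconds else pvLoopA m rest maxb' (seconds + 1)

def cannot_reach_destination (n : Int) (m : Int) (obstacles : List (Int × Int)) : Int :=
  pvLoopA m obstacles 0 0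

-- ===== PORT B =====
-- Stage 1 of B: the prefix-maximum list (cur starts at 0, appended element by element).
def pvPrefix (cur : Int) : List (Int × Int) → List Int
  | [] => []
  | (_, y) :: rest =>
    let cur' := if y > cur then y else cur
    cur' :: pvPrefix cur' rest

-- Stage 2 of B: binary search for the first index with prefix[mid] >= m.
-- prefix[mid] is ported as getD mid 0; exact since 0 ≤ mid < hi ≤ length always holds here.
-- fuel = hi - lo bounds the loop iterations (it strictly shrinks each turn); purely a totality guard.
def pvBsearch (pre : List Int) (m : Int) : Nat → Nat → Nat → Nat
  | 0, lo, _ => lo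
  | fuel + 1, lo, hi =>
    if lo < hi then
      let mid := (lo + hi) / 2
      if pre.getD mid 0 ≥ m then pvBsearch pre m fuel lo mid
      else pvBsearch pre m fuel (mid + 1) hi
    else lo

def cannot_reach_destination_alt (n : Int) (m : Int) (obstacles : List (Int × Int)) : Int :=
  let pre := pvPrefix 0 obstacles
  (pvBsearch pre m pre.length 0 pre.length : Int)

-- ===== PRECONDITION & SPEC =====
def Spec_cannot_reach_destination (n : Int) (m : Int) (obstacles : List (Int × Int)) (out : Int) : Prop := out = cannot_reach_destination_alt n m obstacles
instance (n : Int) (m : Int) (obstacles : List (Int × Int)) (out : Int) : Decidable (Spec_cannot_reach_destination n m obstacles out) := by unfold Spec_cannot_reach_destination; infer_instance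

-- ===== CLAIM (what is proved, stated in full; the proofs are below) =====
def Claim_equal_cannot_reach_destination : Prop := ∀ (n : Int) (m : Int) (obstacles : List (Int × Int)), Dom_cannot_reach_destination n m obstacles → Spec_cannot_reach_destination n m obstacles (cannot_reach_destination n m obstacles)

-- ===== LEMMAS AND PROOFS =====

-- Index (as Nat) of the first element ≥ m, or the length if none: the common characterisation.
def pvFirstGe (m : Int) : List Int → Nat
  | [] => 0
  | a :: r => if a ≥ m then 0 else 1 + pvFirstGe m r

theorem pvFirstGe_le_length (m : Int) (l : List Int) : pvFirstGe m l ≤ l.length := by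
  induction l with
  | nil => simp [pvFirstGe]
  | cons a r ih =>
    simp only [pvFirstGe, List.length_cons]
    split <;> omega

-- A's loop counts exactly the entries of the prefix-maximum list that precede the first ≥ m.
theorem pvLoopA_eq_firstGe (m : Int) (l : List (Int × Int)) (c s : Int) :
    pvLoopA m l c s = s + (pvFirstGe m (pvPrefix c l) : Int) := by
  induction l generalizing c s with
  | nil => simp [pvLoopA, pvPrefix, pvFirstGe]
  | cons p r ih =>
    obtain ⟨x, y⟩ := p
    simp only [pvLoopA, pvPrefix, pvFirstGe]
    have hmax : max c y = if y > c then y else c := by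
      by_cases h : y > c
      · rw [if_pos h]; exact max_eq_right (by omega)
      · rw [if_neg h]; exact max_eq_left (by omega)
    rw [← hmax]
    by_cases hb : max c y ≥ m
    · simp [hb]
    · rw [if_neg hb, if_neg hb, ih]
      push_cast
      ring

-- Every element of the prefix-maximum list is ≥ the seed.
theorem pvPrefix_ge_seed (c : Int) (l : List (Int × Int)) :
    ∀ a ∈ pvPrefix c l, c ≤ a := by
  induction l generalizing c with
  | nil => simp [pvPrefix]
  | cons p r ih =>
    obtain ⟨x, y⟩ := p
    simp only [pvPrefix, List.mem_cons]
    rintro a (rfl | ha)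
    · split <;> omega
    · have := ih (if y > c then y else c) a ha
      split at this <;> omega

-- The prefix-maximum list is nondecreasing.
theorem pvPrefix_pairwise (c : Int) (l : List (Int × Int)) :
    (pvPrefix c l).Pairwise (· ≤ ·) := by
  induction l generalizing c with
  | nil => simp [pvPrefix]
  | cons p r ih =>
    obtain ⟨x, y⟩ := p
    simp only [pvPrefix]
    exact List.Pairwise.cons (pvPrefix_ge_seed _ r) (ih _)

theorem pvFirstGe_gt_of_lt (m : Int) (l : List Int) (hpw : l.Pairwise (· ≤ ·)) :
    ∀ i, i < l.length → l.getD i 0 < m → i < pvFirstGe m l := by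
  induction l with
  | nil => simp
  | cons a r ih =>
    intro i hi hlt
    rcases List.pairwise_cons.mp hpw with ⟨ha, hr⟩
    cases i with
    | zero =>
      rw [List.getD_cons_zero] at hlt
      simp only [pvFirstGe]
      rw [if_neg (by omega)]
      omega
    | succ j =>
      simp only [List.length_cons] at hi
      simp only [List.getD_cons_succ] at hlt
      have hj := ih hr j (by omega) hlt
      have hna : ¬ a ≥ m := by
        have hget : r.getD j 0 = r[j]'(by omega) := List.getD_eq_getElem r 0 (by omega)
        have := ha _ (List.getElem_mem (by omega : j < r.length))
        rw [← hget] at this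
        omega
      simp only [pvFirstGe, if_neg hna]
      omega

theorem pvFirstGe_le_of_ge (m : Int) (l : List Int) :
    ∀ i, i < l.length → l.getD i 0 ≥ m → pvFirstGe m l ≤ i := by
  induction l with
  | nil => simp
  | cons a r ih =>
    intro i hi hge
    cases i with
    | zero =>
      rw [List.getD_cons_zero] at hge
      simp [pvFirstGe, hge]
    | succ j =>
      simp only [List.length_cons] at hi
      simp only [List.getD_cons_succ] at hge
      have := ih j (by omega) hge
      simp only [pvFirstGe]
      split <;> omega

-- Binary-search correctness: with enough fuel and the first index k with l[k] ≥ m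
-- bracketed in [lo, hi], pvBsearch converges to k.
theorem pvBsearch_eq (l : List Int) (m : Int) :
    ∀ fuel lo hi, l.Pairwise (· ≤ ·) → hi ≤ l.length →
      lo ≤ pvFirstGe m l → pvFirstGe m l ≤ hi → hi - lo ≤ fuel →
      pvBsearch l m fuel lo hi = pvFirstGe m l := by
  intro fuel
  induction fuel with
  | zero =>
    intro lo hi _ _ hlo hhi hf
    simp only [pvBsearch]
    omega
  | succ f ih =>
    intro lo hi hpw hlen hlo hhi hf
    simp only [pvBsearch]
    by_cases h : lo < hi
    · rw [if_pos h]
      set mid := (lo + hi) / 2 with hmid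
      by_cases hm : l.getD mid 0 ≥ m
      · rw [if_pos hm]
        have hk : pvFirstGe m l ≤ mid := pvFirstGe_le_of_ge m l mid (by omega) hm
        exact ih lo mid hpw (by omega) hlo hk (by omega)
      · rw [if_neg hm]
        have hk : mid < pvFirstGe m l :=
          pvFirstGe_gt_of_lt m l hpw mid (by omega) (by omega)
        exact ih (mid + 1) hi hpw hlen (by omega) hhi (by omega)
    · rw [if_neg h]
      omega

-- ===== VERDICT (by name: the statement is the Claim_ definition above) =====
theorem cannot_reach_destination_spec : Claim_equal_cannot_reach_destination := by
  intro n m obstacles _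
  unfold Spec_cannot_reach_destination cannot_reach_destination cannot_reach_destination_alt
  show _ = ((pvBsearch (pvPrefix 0 obstacles) m (pvPrefix 0 obstacles).length 0
      (pvPrefix 0 obstacles).length : Nat) : Int)
  rw [pvLoopA_eq_firstGe,
      pvBsearch_eq (pvPrefix 0 obstacles) m (pvPrefix 0 obstacles).length 0
        (pvPrefix 0 obstacles).length
        (pvPrefix_pairwise 0 obstacles) le_rfl (Nat.zero_le _)
        (pvFirstGe_le_length m _) (by omega)]
  ring
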